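-- pv_equiv track=rewrite | github.com/29TanayRaj/Genetic_Programming_Trees | graph_builder/dot_converter.py | _parse
-- ===== SOURCE A (Python) =====
-- from typing import Tuple, List
--
-- def _parse(tokens: List[str], dot: List[str], counter: List[int]) -> Tuple[int, int]:
--     """
--     Recursive descent parser:
--     returns (current_position, node_id)
--     """
--     if not tokens:
--         raise ValueError("Invalid prefix expression")
--
--     token = tokens.pop(0)
--
--     # Terminal leaf node
--     if token != "(":
--         node_id = counter[0]
--         dot.append(f'    {node_id} [label="{token}"];')
--         counter[0] += 1
--         return tokens, node_id
--
--     # Function node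
--     func_name = tokens.pop(0)
--     node_id = counter[0]
--     dot.append(f'    {node_id} [label="{func_name}"];')
--     counter[0] += 1
--
--     # Parse children until ")"
--     while tokens[0] != ")":
--         tokens, child_id = _parse(tokens, dot, counter)
--         dot.append(f"    {node_id} -> {child_id};")
--
--     tokens.pop(0)  # remove ")"
--     return tokens, node_id
-- ===== SOURCE B (Python) =====
-- from typing import Tuple, List
--
-- def _parse(tokens: List[str], dot: List[str], counter: List[int]) -> Tuple[int, int]:
--     """
--     Iterative state-machine parser (no recursion): scans with an index and a
--     stack of pending parent node ids, then truncates the consumed prefix once.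
--     Same final mutation of tokens/dot/counter and same return value as the
--     recursive version on well-formed input.
--     """
--     if not tokens:
--         raise ValueError("Invalid prefix expression")
--     i = 0
--     stack = []
--     mode = None          # None = read a new node; otherwise a completed node id
--     while True:
--         if mode is None:
--             token = tokens[i]
--             i += 1
--             if token == "(":
--                 label = tokens[i]
--                 i += 1
--             else:
--                 label = token
--             nid = counter[0]
--             dot.append(f'    {nid} [label="{label}"];')
--             counter[0] += 1
--             if token != "(":
--                 mode = nid
--             elif tokens[i] == ")":
--                 i += 1
--                 mode = nid
--             else:
--                 stack.append(nid)
--         else: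
--             nid = mode
--             if not stack:
--                 del tokens[:i]
--                 return tokens, nid
--             parent = stack[-1]
--             dot.append(f"    {parent} -> {nid};")
--             if tokens[i] == ")":
--                 i += 1
--                 stack.pop()
--                 mode = parent
--             else:
--                 mode = None
-- ===== Notes on version B (the rewrite author's own statement) =====
-- stated objective: alternative
-- what changed: The recursive-descent parser with repeated tokens.pop(0) is replaced by a single-loop state-machine parser (explicit stack of pending parent ids, read/close modes) that scans with an index and truncates the consumed prefix of tokens once at the end; same final mutation of tokens/dot/counter and same return value on well-formed input.
import Mathlib
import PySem

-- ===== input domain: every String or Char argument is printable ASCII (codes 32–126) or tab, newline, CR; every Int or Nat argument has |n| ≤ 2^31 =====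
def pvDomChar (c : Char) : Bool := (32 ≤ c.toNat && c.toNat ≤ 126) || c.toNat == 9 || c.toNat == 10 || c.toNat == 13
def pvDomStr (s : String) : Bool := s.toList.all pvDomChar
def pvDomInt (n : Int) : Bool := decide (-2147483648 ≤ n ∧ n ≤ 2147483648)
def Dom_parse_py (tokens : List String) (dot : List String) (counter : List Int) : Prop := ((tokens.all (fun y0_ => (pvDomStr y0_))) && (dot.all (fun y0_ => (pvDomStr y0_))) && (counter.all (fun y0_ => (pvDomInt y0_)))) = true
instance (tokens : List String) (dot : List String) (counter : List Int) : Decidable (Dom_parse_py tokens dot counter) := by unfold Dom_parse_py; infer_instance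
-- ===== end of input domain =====

-- B replaces A's recursive descent by a single-loop state-machine parser (explicit stack
-- of pending parent ids); equivalence is about the RETURN value (tokens', node_id) — both
-- Pythons leave tokens/dot/counter in the same final state on inputs satisfying Pre_.
-- In both ports a Python exception (ValueError/IndexError) is modelled by `none`.

-- f'    {nid} [label="{lab}"];'
def pvNodeLine (nid : Int) (lab : String) : String :=
  "    " ++ PySem.Int.toStr nid ++ " [label=\"" ++ lab ++ "\"];"
-- f'    {p} -> {c};'
def pvEdgeLine (p c : Int) : String :=
  "    " ++ PySem.Int.toStr p ++ " -> " ++ PySem.Int.toStr c ++ ";"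

-- ===== PORT A =====
-- _parse, recursive descent; state (tokens, dot, counter) threaded, result (tokens', dot', counter', node_id).
-- Fuel is only a totality guard (2*|tokens|+2 always suffices); none = Python raises.
mutual
def pvParseA : Nat → List String → List String → List Int → Option (List String × List String × List Int × Int)
  | 0, _, _, _ => none
  | fuel+1, toks, dot, ctr =>
    match toks with
    | [] => none                        -- raise ValueError
    | t :: rest =>
      if t ≠ "(" then
        let nid := ctr.headD 0          -- counter[0] (Pre_ guarantees counter ≠ [])
        some (rest, dot ++ [pvNodeLine nid t], (nid + 1) :: ctr.tail, nid)
      else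
        match rest with
        | [] => none                    -- tokens.pop(0) raises IndexError
        | fn :: rest2 =>
          let nid := ctr.headD 0
          pvChildrenA fuel nid rest2 (dot ++ [pvNodeLine nid fn]) ((nid + 1) :: ctr.tail)

def pvChildrenA : Nat → Int → List String → List String → List Int → Option (List String × List String × List Int × Int)
  | 0, _, _, _, _ => none
  | fuel+1, nid, toks, dot, ctr =>
    match toks with
    | [] => none                        -- tokens[0] raises IndexError
    | t :: rest =>
      if t = ")" then some (rest, dot, ctr, nid)
      else
        match pvParseA fuel (t :: rest) dot ctr with
        | none => none
        | some (toks1, dot1, ctr1, cid) =>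
          pvChildrenA fuel nid toks1 (dot1 ++ [pvEdgeLine nid cid]) ctr1
end

def parse_py (tokens : List String) (dot : List String) (counter : List Int) : List String × Int :=
  match pvParseA (2 * tokens.length + 2) tokens dot counter with
  | some r => (r.1, r.2.2.2)
  | none => ([], 0)                     -- Python raises here; excluded by Pre_

-- ===== PORT B =====
-- Source B's state machine: mode None = read a node (PvBMode.read), mode nid = node nid just
-- completed (PvBMode.close nid); stack of pending parent ids; the index into tokens is
-- represented by the remaining suffix (Source B does `del tokens[:i]` once at the end).
inductive PvBMode
  | read
  | close (nid : Int)
deriving DecidableEq, Repr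

def pvRunB : Nat → PvBMode → List Int → List String → List String → List Int → Option (List String × List String × List Int × Int)
  | 0, _, _, _, _, _ => none
  | fuel+1, PvBMode.read, stack, toks, dot, ctr =>
    match toks with
    | [] => none                        -- raise ValueError / IndexError
    | t :: rest =>
      let nid := ctr.headD 0
      if t = "(" then
        match rest with
        | [] => none                    -- tokens[i] raises IndexError
        | fn :: rest2 =>
          let dot2 := dot ++ [pvNodeLine nid fn]
          let ctr2 := (nid + 1) :: ctr.tail
          match rest2 with
          | [] => none                  -- tokens[i] raises IndexError
          | u :: rest3 =>
            if u = ")" then pvRunB fuel (PvBMode.close nid) stack rest3 dot2 ctr2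
            else pvRunB fuel PvBMode.read (nid :: stack) rest2 dot2 ctr2
      else
        pvRunB fuel (PvBMode.close nid) stack rest (dot ++ [pvNodeLine nid t]) ((nid + 1) :: ctr.tail)
  | fuel+1, PvBMode.close nid, stack, toks, dot, ctr =>
    match stack with
    | [] => some (toks, dot, ctr, nid)  -- del tokens[:i]; return tokens, nid
    | p :: s =>
      let dot2 := dot ++ [pvEdgeLine p nid]
      match toks with
      | [] => none                      -- tokens[i] raises IndexError
      | u :: rest =>
        if u = ")" then pvRunB fuel (PvBMode.close p) s rest dot2 ctr
        else pvRunB fuel PvBMode.read stack toks dot2 ctr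

def parse_py_alt (tokens : List String) (dot : List String) (counter : List Int) : List String × Int :=
  match pvRunB (2 * tokens.length + 2) PvBMode.read [] tokens dot counter with
  | some r => (r.1, r.2.2.2)
  | none => ([], 0)                     -- Python raises here; excluded by Pre_

-- ===== PRECONDITION & SPEC =====
-- Closed-form domain condition: a nonempty tokens list whose head is not "(" starts a leaf;
-- otherwise "(" must be followed by a name token and then by a token sequence that closes one
-- pending children list, per the depth scan below (after "(" one token — the name — is skipped,
-- ")" closes a level, any other token is a leaf child). Pre_ excludes exactly the inputs on which
-- the Python A raises: an empty counter (counter[0] → IndexError) or a tokens list not starting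
-- with a well-formed prefix expression (ValueError / IndexError).
def pvDepthScan : List String → Nat → Bool
  | [], _ => false
  | t :: rest, d =>
    if t = ")" then (d == 1) || pvDepthScan rest (d - 1)
    else if t = "(" then
      match rest with
      | [] => false
      | _ :: rest2 => pvDepthScan rest2 (d + 1)
    else pvDepthScan rest d

def Pre_parse_py (tokens : List String) (_dot : List String) (counter : List Int) : Prop :=
  counter ≠ [] ∧ tokens ≠ [] ∧
    (tokens.head? = some "(" → tokens.tail ≠ [] ∧ pvDepthScan tokens.tail.tail 1 = true)

instance (tokens : List String) (dot : List String) (counter : List Int) : Decidable (Pre_parse_py tokens dot counter) := by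
  unfold Pre_parse_py; infer_instance

def pvWitness_parse_py : List String × List String × List Int :=
  (["(", "+", "x", "(", "*", "y", "z", ")", ")"], [], [0])

def Spec_parse_py (tokens : List String) (dot : List String) (counter : List Int) (out : List String × Int) : Prop := out = parse_py_alt tokens dot counter
instance (tokens : List String) (dot : List String) (counter : List Int) (out : List String × Int) : Decidable (Spec_parse_py tokens dot counter out) := by unfold Spec_parse_py; infer_instance

-- ===== CLAIM (what is proved, stated in full; the proofs are below) =====
def Claim_equal_parse_py : Prop := ∀ (tokens : List String) (dot : List String) (counter : List Int), Dom_parse_py tokens dot counter → Pre_parse_py tokens dot counter → Spec_parse_py tokens dot counter (parse_py tokens dot counter)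

-- ===== LEMMAS AND PROOFS =====

-- Proof-only grammar recognizer for  E ::= atom | "(" name E* ")"  (fuel is a totality guard):
-- pvRecoE checks one expression, pvRecoC a children list up to its closing ")".
mutual
def pvRecoE : Nat → List String → Option (List String)
  | 0, _ => none
  | fuel+1, toks =>
    match toks with
    | [] => none
    | t :: rest =>
      if t = "(" then
        match rest with
        | [] => none
        | _ :: rest2 => pvRecoC fuel rest2
      else some rest

def pvRecoC : Nat → List String → Option (List String)
  | 0, _ => none
  | fuel+1, toks =>
    match toks with
    | [] => none
    | t :: rest =>
      if t = ")" then some rest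
      else
        match pvRecoE fuel toks with
        | none => none
        | some mid => pvRecoC fuel mid
end


theorem pvParseA_mono_le : ∀ g f, f ≤ g →
    (∀ toks dot ctr r, pvParseA f toks dot ctr = some r → pvParseA g toks dot ctr = some r) ∧
    (∀ nid toks dot ctr r, pvChildrenA f nid toks dot ctr = some r → pvChildrenA g nid toks dot ctr = some r) := by
  intro g
  induction g with
  | zero =>
    intro f hf
    interval_cases f
    exact ⟨fun _ _ _ _ h => h, fun _ _ _ _ _ h => h⟩
  | succ G ih =>
    intro f hf
    match f with
    | 0 =>
      constructor
      · intro toks dot ctr r h; simp [pvParseA] at h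
      · intro nid toks dot ctr r h; simp [pvChildrenA] at h
    | F + 1 =>
      have hFG : F ≤ G := by omega
      obtain ⟨ihP, ihC⟩ := ih F hFG
      constructor
      · intro toks dot ctr r h
        match toks with
        | [] => simp [pvParseA] at h
        | t :: rest =>
          simp only [pvParseA] at h ⊢
          split_ifs at h ⊢ with ht
          · exact h
          · match rest with
            | [] => simp at h
            | fn :: rest2 => exact ihC _ _ _ _ _ h
      · intro nid toks dot ctr r h
        match toks with
        | [] => simp [pvChildrenA] at h
        | t :: rest =>
          simp only [pvChildrenA] at h ⊢
          split_ifs at h ⊢ with ht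
          · exact h
          · cases hp : pvParseA F (t :: rest) dot ctr with
            | none => rw [hp] at h; simp at h
            | some v =>
              rw [hp] at h
              obtain ⟨toks1, dot1, ctr1, cid⟩ := v
              rw [ihP _ _ _ _ hp]
              exact ihC _ _ _ _ _ h

theorem pvRunB_mono_le : ∀ g f, f ≤ g →
    ∀ mode stack toks dot ctr r, pvRunB f mode stack toks dot ctr = some r → pvRunB g mode stack toks dot ctr = some r := by
  intro g
  induction g with
  | zero =>
    intro f hf
    interval_cases f
    exact fun _ _ _ _ _ _ h => h
  | succ G ih =>
    intro f hf mode stack toks dot ctr r h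
    match f with
    | 0 => simp [pvRunB] at h
    | F + 1 =>
      have hFG : F ≤ G := by omega
      match mode with
      | PvBMode.read =>
        match toks with
        | [] => simp [pvRunB] at h
        | t :: rest =>
          simp only [pvRunB] at h ⊢
          split_ifs at h ⊢ with ht
          · match rest with
            | [] => simp at h
            | fn :: rest2 =>
              match rest2 with
              | [] => simp at h
              | u :: rest3 =>
                simp only at h ⊢
                split_ifs at h ⊢ with hu
                · exact ih F hFG _ _ _ _ _ _ h
                · exact ih F hFG _ _ _ _ _ _ h
          · exact ih F hFG _ _ _ _ _ _ h
      | PvBMode.close nid =>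
        match stack with
        | [] => simpa [pvRunB] using h
        | p :: st =>
          simp only [pvRunB] at h ⊢
          match toks with
          | [] => simp at h
          | u :: rest =>
            simp only at h ⊢
            split_ifs at h ⊢ with hu
            · exact ih F hFG _ _ _ _ _ _ h
            · exact ih F hFG _ _ _ _ _ _ h

-- B's continuation point inside the child list of parent p: look at the next token;
-- ")" closes p, anything else reads p's next child.
def pvContB (fuel : Nat) (stack : List Int) (p : Int) (toks dot : List String) (ctr : List Int) : Option (List String × List String × List Int × Int) :=
  match toks with
  | [] => none
  | u :: rest => if u = ")" then pvRunB fuel (PvBMode.close p) stack rest dot ctr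
                 else pvRunB fuel PvBMode.read (p :: stack) toks dot ctr

theorem pvContB_mono_le {f g : Nat} (h : f ≤ g) (stack : List Int) (p : Int) (toks dot : List String) (ctr : List Int)
    (r : List String × List String × List Int × Int) (hr : pvContB f stack p toks dot ctr = some r) :
    pvContB g stack p toks dot ctr = some r := by
  match toks with
  | [] => simp [pvContB] at hr
  | u :: rest =>
    simp only [pvContB] at hr ⊢
    split_ifs at hr ⊢ with hu
    · exact pvRunB_mono_le g f h _ _ _ _ _ _ hr
    · exact pvRunB_mono_le g f h _ _ _ _ _ _ hr

theorem pvReco_length : ∀ fuel,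
    (∀ toks rest, pvRecoE fuel toks = some rest → rest.length < toks.length) ∧
    (∀ toks rest, pvRecoC fuel toks = some rest → rest.length < toks.length) := by
  intro fuel
  induction fuel with
  | zero =>
    constructor
    · intro toks rest h; simp [pvRecoE] at h
    · intro toks rest h; simp [pvRecoC] at h
  | succ f ih =>
    obtain ⟨ihE, ihC⟩ := ih
    constructor
    · intro toks rest h
      match toks with
      | [] => simp [pvRecoE] at h
      | t :: r0 =>
        simp only [pvRecoE] at h
        split_ifs at h with ht
        · match r0 with
          | [] => simp at h
          | _ :: rest2 =>
            have := ihC _ _ h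
            simp at this ⊢
            omega
        · simp at h; subst h; simp
    · intro toks rest h
      match toks with
      | [] => simp [pvRecoC] at h
      | t :: r0 =>
        simp only [pvRecoC] at h
        split_ifs at h with ht
        · simp at h; subst h; simp
        · cases he : pvRecoE f (t :: r0) with
          | none => rw [he] at h; simp at h
          | some mid =>
            rw [he] at h
            have h1 := ihE _ _ he
            have h2 := ihC _ _ h
            omega

theorem pvRecoC_ne_nil {fuel : Nat} {toks rest : List String} (h : pvRecoC fuel toks = some rest) : toks ≠ [] := by
  intro he
  subst he
  match fuel with
  | 0 => simp [pvRecoC] at h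
  | f+1 => simp [pvRecoC] at h

-- Main correspondence, by induction on the recognizer's fuel: a recognized expression is
-- parsed by A to some (rest, dot2, ctr2, nid) within fuel < 2*|toks|, and B's run from the
-- read state reaches the close state (nid completed) with the same intermediate state.
theorem pvMain : ∀ F : Nat,
    (∀ toks rest, pvRecoE F toks = some rest → ∀ dot ctr stack,
      ∃ dot2 ctr2 nid fA, fA + 1 ≤ 2 * toks.length ∧
        pvParseA fA toks dot ctr = some (rest, dot2, ctr2, nid) ∧
        ∀ g res, pvRunB g (PvBMode.close nid) stack rest dot2 ctr2 = some res →
          pvRunB (g + (2 * (toks.length - rest.length) - 1)) PvBMode.read stack toks dot ctr = some res) ∧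
    (∀ toks rest, pvRecoC F toks = some rest → ∀ p dot ctr stack,
      ∃ dot2 ctr2 fC, fC ≤ 2 * toks.length ∧
        pvChildrenA fC p toks dot ctr = some (rest, dot2, ctr2, p) ∧
        ∀ g res, pvRunB g (PvBMode.close p) stack rest dot2 ctr2 = some res →
          pvContB (g + 2 * (toks.length - rest.length)) stack p toks dot ctr = some res) := by
  intro F
  induction F with
  | zero =>
    constructor
    · intro toks rest h; simp [pvRecoE] at h
    · intro toks rest h; simp [pvRecoC] at h
  | succ F ih =>
    obtain ⟨ihE, ihC⟩ := ih
    constructor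
    · -- expression case
      intro toks rest h dot ctr stack
      match toks with
      | [] => simp [pvRecoE] at h
      | t :: r0 =>
        simp only [pvRecoE] at h
        split_ifs at h with ht
        · -- t = "(" : function node
          subst ht
          match r0 with
          | [] => simp at h
          | fn :: rest2 =>
            have hne : rest2 ≠ [] := pvRecoC_ne_nil h
            have hlen : rest.length < rest2.length := (pvReco_length F).2 _ _ h
            obtain ⟨dot2, ctr2, fC, hfC, hA, hB⟩ :=
              ihC rest2 rest h (ctr.headD 0) (dot ++ [pvNodeLine (ctr.headD 0) fn]) ((ctr.headD 0 + 1) :: ctr.tail) stack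
            refine ⟨dot2, ctr2, ctr.headD 0, fC + 1, by simp only [List.length_cons]; omega, ?_, ?_⟩
            · simp only [pvParseA]
              rw [if_neg (by simp)]
              exact hA
            · intro g res hr
              have h1 := hB g res hr
              match rest2, hne, h1, hlen with
              | u :: rest3, _, h1, hlen =>
                have h2 := pvContB_mono_le
                  (f := g + 2 * ((u :: rest3).length - rest.length))
                  (g := g + 2 * ((u :: rest3).length - rest.length) + 2)
                  (by omega) _ _ _ _ _ _ h1
                have hK : g + (2 * (("(" :: fn :: u :: rest3).length - rest.length) - 1)
                    = (g + 2 * ((u :: rest3).length - rest.length) + 2) + 1 := by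
                  simp only [List.length_cons] at hlen ⊢; omega
                rw [hK]
                generalize g + 2 * ((u :: rest3).length - rest.length) + 2 = K at h2 ⊢
                simp only [pvRunB]
                simp only [pvContB] at h2
                split_ifs at h2 ⊢ <;> exact h2
        · -- leaf
          simp only [Option.some.injEq] at h
          subst h
          refine ⟨dot ++ [pvNodeLine (ctr.headD 0) t], (ctr.headD 0 + 1) :: ctr.tail, ctr.headD 0, 1, by simp only [List.length_cons]; omega, ?_, ?_⟩
          · simp only [pvParseA]
            rw [if_pos ht]
          · intro g res hr
            have hK : g + (2 * ((t :: r0).length - r0.length) - 1) = g + 1 := by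
              simp only [List.length_cons]; omega
            rw [hK]
            simp only [pvRunB]
            rw [if_neg ht]
            exact hr
    · -- children-list case
      intro toks rest h p dot ctr stack
      match toks with
      | [] => simp [pvRecoC] at h
      | t :: r0 =>
        simp only [pvRecoC] at h
        split_ifs at h with ht
        · -- t = ")" : end of children
          subst ht
          simp only [Option.some.injEq] at h
          subst h
          refine ⟨dot, ctr, 1, by simp only [List.length_cons]; omega, ?_, ?_⟩
          · simp [pvChildrenA]
          · intro g res hr
            simp only [pvContB]
            refine pvRunB_mono_le _ g (by simp only [List.length_cons]; omega) _ _ _ _ _ _ hr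
        · -- one more child expression
          cases he : pvRecoE F (t :: r0) with
          | none => rw [he] at h; simp at h
          | some mid =>
            rw [he] at h
            have hmne : mid ≠ [] := pvRecoC_ne_nil h
            have hlenE : mid.length < (t :: r0).length := (pvReco_length F).1 _ _ he
            have hlenC : rest.length < mid.length := (pvReco_length F).2 _ _ h
            obtain ⟨dotE, ctrE, cid, fE, hfE, hAE, hBE⟩ := ihE (t :: r0) mid he dot ctr (p :: stack)
            obtain ⟨dot2, ctr2, fC', hfC', hAC, hBC⟩ := ihC mid rest h p (dotE ++ [pvEdgeLine p cid]) ctrE stack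
            refine ⟨dot2, ctr2, max fE fC' + 1, by omega, ?_, ?_⟩
            · simp only [pvChildrenA]
              rw [if_neg ht]
              rw [(pvParseA_mono_le (max fE fC') fE (le_max_left _ _)).1 _ _ _ _ hAE]
              exact (pvParseA_mono_le (max fE fC') fC' (le_max_right _ _)).2 _ _ _ _ _ hAC
            · intro g res hr
              have h1 := hBC g res hr
              -- bridge: one close step of B turns (close cid, p::stack) into the continuation of p
              match mid, hmne, h1, hlenC, hBE with
              | v :: mtl, _, h1, hlenC, hBE =>
                have h2 : pvRunB (g + 2 * ((v :: mtl).length - rest.length) + 1)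
                    (PvBMode.close cid) (p :: stack) (v :: mtl) dotE ctrE = some res := by
                  simp only [pvRunB]
                  simp only [pvContB] at h1
                  split_ifs at h1 ⊢ with hu
                  · exact h1
                  · exact h1
                have h3 := hBE _ _ h2
                have hK : g + 2 * ((v :: mtl).length - rest.length) + 1 +
                    (2 * ((t :: r0).length - (v :: mtl).length) - 1)
                    = g + 2 * ((t :: r0).length - rest.length) := by
                  simp at hlenE hlenC ⊢; omega
                rw [hK] at h3
                simp only [pvContB]
                rw [if_neg ht]
                exact h3

theorem pvReco_mono_le : ∀ g f, f ≤ g →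
    (∀ toks r, pvRecoE f toks = some r → pvRecoE g toks = some r) ∧
    (∀ toks r, pvRecoC f toks = some r → pvRecoC g toks = some r) := by
  intro g
  induction g with
  | zero =>
    intro f hf
    interval_cases f
    exact ⟨fun _ _ h => h, fun _ _ h => h⟩
  | succ G ih =>
    intro f hf
    match f with
    | 0 =>
      constructor
      · intro toks r h; simp [pvRecoE] at h
      · intro toks r h; simp [pvRecoC] at h
    | F + 1 =>
      obtain ⟨ihE, ihC⟩ := ih F (by omega)
      constructor
      · intro toks r h
        match toks with
        | [] => simp [pvRecoE] at h
        | t :: rest =>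
          simp only [pvRecoE] at h ⊢
          split_ifs at h ⊢ with ht
          · match rest with
            | [] => simp at h
            | _ :: rest2 => exact ihC _ _ h
          · exact h
      · intro toks r h
        match toks with
        | [] => simp [pvRecoC] at h
        | t :: rest =>
          simp only [pvRecoC] at h ⊢
          split_ifs at h ⊢ with ht
          · exact h
          · cases he : pvRecoE F (t :: rest) with
            | none => rw [he] at h; simp at h
            | some mid =>
              rw [he] at h
              rw [ihE _ _ he]
              exact ihC _ _ h

-- d pending children lists are closed in turn by toks, leaving r; each link carries its fuel bound.
def pvChainOk : Nat → List String → List String → Prop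
  | 0, toks, r => r = toks
  | d + 1, toks, r => ∃ F m, F ≤ 2 * toks.length ∧ pvRecoC F toks = some m ∧ pvChainOk d m r

theorem pvScan_chain : ∀ toks : List String, ∀ d : Nat,
    pvDepthScan toks d = true → ∃ r, pvChainOk d toks r := by
  intro toks
  induction hn : toks.length using Nat.strong_induction_on generalizing toks with
  | _ n ih =>
    intro d h
    match toks, hn, h with
    | [], hn, h0 => simp [pvDepthScan] at h0
    | t :: rest, hn, h0 =>
      match d, h0 with
      | 0, _ => exact ⟨t :: rest, rfl⟩
      | e + 1, h1 =>
        rw [pvDepthScan.eq_def] at h1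
        simp only [] at h1
        split_ifs at h1 with ht hp
        · -- t = ")" : closes one level
          subst ht
          match e, h1 with
          | 0, _ => exact ⟨rest, 1, rest, by simp only [List.length_cons]; omega, by simp [pvRecoC], rfl⟩
          | e' + 1, h2 =>
            have hscan : pvDepthScan rest (e' + 1) = true := by simpa using h2
            obtain ⟨r, hr⟩ := ih rest.length (by subst hn; simp) rest rfl (e' + 1) hscan
            exact ⟨r, 1, rest, by simp only [List.length_cons]; omega, by simp [pvRecoC], hr⟩
        · -- t = "(" : opens a level, skipping the name token
          subst hp
          match rest, h1 with
          | name :: rest2, h2 =>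
            obtain ⟨r, hr⟩ := ih rest2.length (by subst hn; simp only [List.length_cons]; omega) rest2 rfl (e + 2) h2
            obtain ⟨F1, m1, hF1, hlink1, htail⟩ := hr
            obtain ⟨G, m2, hG, hlink2, htail2⟩ := htail
            have hm1 : m1.length < rest2.length := (pvReco_length F1).2 _ _ hlink1
            have hE1 : pvRecoE (F1 + 1) ("(" :: name :: rest2) = some m1 := by
              simp only [pvRecoE, if_true]
              exact hlink1
            have hE : pvRecoE (max (F1 + 1) G) ("(" :: name :: rest2) = some m1 :=
              (pvReco_mono_le _ _ (le_max_left _ _)).1 _ _ hE1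
            have hC : pvRecoC (max (F1 + 1) G) m1 = some m2 :=
              (pvReco_mono_le _ _ (le_max_right _ _)).2 _ _ hlink2
            refine ⟨r, max (F1 + 1) G + 1, m2, by simp only [List.length_cons] at hF1 hm1 ⊢; omega, ?_, htail2⟩
            rw [pvRecoC.eq_def]
            simp only []
            rw [if_neg (by simp)]
            rw [hE]
            exact hC
        · -- leaf child
          obtain ⟨r, hr⟩ := ih rest.length (by subst hn; simp) rest rfl (e + 1) h1
          obtain ⟨G, m, hG, hlink, htail⟩ := hr
          have hlink2 : pvRecoC (G + 1) rest = some m := (pvReco_mono_le _ _ (by omega)).2 _ _ hlink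
          have hE : pvRecoE (G + 1) (t :: rest) = some rest := by
            simp only [pvRecoE]
            rw [if_neg hp]
          refine ⟨r, G + 2, m, by simp only [List.length_cons]; omega, ?_, htail⟩
          rw [pvRecoC.eq_def]
          simp only []
          rw [if_neg ht]
          rw [hE]
          exact hlink2

-- Pre_ admits exactly inputs whose tokens are recognized by the grammar recognizer.
theorem pvPre_reco {tokens : List String} {dot : List String} {counter : List Int}
    (h : Pre_parse_py tokens dot counter) :
    ∃ r, pvRecoE (2 * tokens.length + 2) tokens = some r := by
  obtain ⟨-, hne, himp⟩ := h
  match tokens, hne with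
  | t :: rest, _ =>
    by_cases ht : t = "("
    · subst ht
      obtain ⟨hrne, hscan⟩ := himp (by simp)
      match rest, hrne with
      | name :: rest2, _ =>
        simp only [List.tail_cons] at hscan
        obtain ⟨r, F, m, hF, hlink, htail⟩ := pvScan_chain rest2 1 hscan
        refine ⟨m, ?_⟩
        simp only [pvRecoE, if_true]
        exact (pvReco_mono_le _ _ (by simp at hF ⊢; omega)).2 _ _ hlink
    · refine ⟨rest, ?_⟩
      simp only [pvRecoE]
      rw [if_neg ht]

-- ===== VERDICT (by name: the statement is the Claim_ definition above) =====
theorem parse_py_spec : Claim_equal_parse_py := by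
  intro tokens dot counter _ hpre
  obtain ⟨rest, hre⟩ := pvPre_reco hpre
  · obtain ⟨dot2, ctr2, nid, fA, hfA, hA, hB⟩ := (pvMain _).1 tokens rest hre dot counter []
    have hlen : rest.length < tokens.length := (pvReco_length _).1 _ _ hre
    have hA2 : pvParseA (2 * tokens.length + 2) tokens dot counter = some (rest, dot2, ctr2, nid) :=
      (pvParseA_mono_le (2 * tokens.length + 2) fA (by omega)).1 _ _ _ _ hA
    have hbase : pvRunB 1 (PvBMode.close nid) [] rest dot2 ctr2 = some (rest, dot2, ctr2, nid) := by
      simp [pvRunB]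
    have hB1 := hB 1 _ hbase
    have hB2 : pvRunB (2 * tokens.length + 2) PvBMode.read [] tokens dot counter = some (rest, dot2, ctr2, nid) :=
      pvRunB_mono_le _ _ (by omega) _ _ _ _ _ _ hB1
    show parse_py tokens dot counter = parse_py_alt tokens dot counter
    unfold parse_py parse_py_alt
    rw [hA2, hB2]
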